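-- pv_equiv track=rewrite | github.com/hackingmaterials/matminer | matminer/data_retrieval/retrieve_MongoDB.py | clean_projection
-- ===== SOURCE A (Python) =====
-- from itertools import groupby
--
-- def clean_projection(projection):
--     """
--     Projecting on e.g. 'a.b.' and 'a' is disallowed in MongoDb, so project
--     inclusively. See unit tests for examples of what this is doing.
--
--     Args:
--         projection: (list) - list of fields to retrieve; dot-notation is allowed.
--     """
--     all_proj = []
--     for group in groupby(sorted(projection), key=lambda p: p.split(".", 1)[0]):
--         common = ''
--         derivs = list(group[1])
--         smallest_deriv = derivs[0]
--         buffer = ""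
--         for i in range(len(smallest_deriv)):
--             all_match = True
--             for deriv in derivs:
--                 if deriv[i] != smallest_deriv[i]:
--                     all_match = False
--                     break
--             if all_match:
--                 if smallest_deriv[i] == '.':
--                     common += buffer
--                     buffer = ''
--                 buffer += smallest_deriv[i]
--                 if i == len(smallest_deriv) - 1:
--                     common += buffer
--             else:
--                 break
--         all_proj.append(common)
--     return all_proj
-- ===== SOURCE B (Python) =====
-- from itertools import groupby
--
-- def _lcp2(a, b):
--     out = []
--     for x, y in zip(a, b):
--         if x != y:
--             break
--         out.append(x)
--     return "".join(out)
--
-- def clean_projection(projection):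
--     """Per sorted first-segment group: character-wise LCP of the members,
--     kept whole when it equals the smallest member, else cut at its last dot."""
--     all_proj = []
--     for _, grp in groupby(sorted(projection), key=lambda p: p.split(".", 1)[0]):
--         members = list(grp)
--         lcp = members[0]
--         for m in members[1:]:
--             lcp = _lcp2(lcp, m)
--         all_proj.append(lcp if lcp == members[0] else lcp.rpartition(".")[0])
--     return all_proj
-- ===== Notes on version B (the rewrite author's own statement) =====
-- stated objective: simpler
-- what changed: Replaces A's position-by-position member scan with buffer/flush bookkeeping by one longest-common-prefix fold over each sorted first-segment group followed by a three-way branch (keep the LCP if it equals the smallest member, else cut it at its last dot via rpartition).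
import Mathlib
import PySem

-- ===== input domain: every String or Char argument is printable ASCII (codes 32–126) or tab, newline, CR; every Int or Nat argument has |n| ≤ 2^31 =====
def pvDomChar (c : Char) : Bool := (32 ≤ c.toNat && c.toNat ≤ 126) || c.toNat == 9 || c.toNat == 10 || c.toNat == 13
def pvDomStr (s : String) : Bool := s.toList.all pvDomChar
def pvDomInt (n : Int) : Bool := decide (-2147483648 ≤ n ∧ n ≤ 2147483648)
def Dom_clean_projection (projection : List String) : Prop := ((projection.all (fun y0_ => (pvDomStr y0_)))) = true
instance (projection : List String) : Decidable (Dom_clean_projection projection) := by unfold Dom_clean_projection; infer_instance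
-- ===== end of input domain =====

-- B replaces A's positional member-scan with buffer flushing by one fold of pairwise
-- longest-common-prefixes per group plus a three-way branch (objective: simpler).

-- ===== PORT A =====
-- p.split(".", 1)[0] — splitMax? with sep "." always returns `some (k :: _)`; the second arm is unreachable.
def pvKey (p : String) : String :=
  match PySem.Str.splitMax? p "." 1 with
  | some (k :: _) => k
  | _ => p

-- itertools.groupby over sorted(projection): maximal consecutive runs of equal key.
-- Both Pythons call groupby with the same key, so both ports share this helper.
def pvRuns : List String → List (List String)
  | [] => []
  | x :: xs =>
    (x :: xs.takeWhile (fun y => pvKey y == pvKey x)) ::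
      pvRuns (xs.dropWhile (fun y => pvKey y == pvKey x))
  termination_by l => l.length
  decreasing_by exact Nat.lt_succ_of_le (xs.length_dropWhile_le _)

-- A's inner `for i in range(len(smallest_deriv))` with the member scan and buffer flushing.
-- `deriv[i]` is ported as pyGet?; its none case (Python's IndexError) is treated as a mismatch —
-- unreachable from clean_projection, where groups come from a sorted list.
def pvALoop (derivs : List (List Char)) (s : List Char) (i : Nat)
    (common buffer : List Char) : List Char :=
  if h : i < s.length then
    if derivs.all (fun d => PySem.List.pyGet? d (i : Int) == some s[i]) then
      let cb := if s[i] = '.' then (common ++ buffer, ([] : List Char)) else (common, buffer)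
      let buffer' := cb.2 ++ [s[i]]
      let common' := if i = s.length - 1 then cb.1 ++ buffer' else cb.1
      pvALoop derivs s (i + 1) common' buffer'
    else common
  else common
  termination_by s.length - i

def pvAGroup (derivs : List (List Char)) : List Char :=
  match derivs with
  | [] => []          -- unreachable: groupby groups are nonempty
  | s :: _ => pvALoop derivs s 0 [] []

def clean_projection (projection : List String) : List String :=
  (pvRuns (PySem.List.sorted projection (fun p => p) false)).map
    (fun g => String.ofList (pvAGroup (g.map String.toList)))

-- ===== PORT B =====
-- _lcp2: zip with break, building the agreeing prefix.
def pvLcp2 : List Char → List Char → List Char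
  | x :: a, y :: b => if x = y then x :: pvLcp2 a b else []
  | _, _ => []

-- lcp.rpartition(".")[0]: everything before the LAST '.', "" when there is none (exact).
def pvRpartHead (t : List Char) : List Char :=
  ((t.reverse.dropWhile (fun c => c ≠ '.')).drop 1).reverse

def pvBGroup : List (List Char) → List Char
  | [] => []          -- unreachable: groupby groups are nonempty
  | s :: rest =>
    let lcp := rest.foldl pvLcp2 s
    if lcp = s then s else pvRpartHead lcp

def clean_projection_alt (projection : List String) : List String :=
  (pvRuns (PySem.List.sorted projection (fun p => p) false)).map
    (fun g => String.ofList (pvBGroup (g.map String.toList)))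

-- ===== PRECONDITION & SPEC =====
def Spec_clean_projection (projection : List String) (out : List String) : Prop := out = clean_projection_alt projection
instance (projection : List String) (out : List String) : Decidable (Spec_clean_projection projection out) := by unfold Spec_clean_projection; infer_instance

-- ===== CLAIM (what is proved, stated in full; the proofs are below) =====
def Claim_equal_clean_projection : Prop := ∀ (projection : List String), Dom_clean_projection projection → Spec_clean_projection projection (clean_projection projection)

-- ===== LEMMAS AND PROOFS =====

theorem pvLcp2_prefix_left (a b : List Char) : pvLcp2 a b <+: a := by
  induction a generalizing b with
  | nil => simp [pvLcp2]
  | cons x a ih =>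
    cases b with
    | nil => simp [pvLcp2]
    | cons y b =>
      by_cases hxy : x = y
      · simp only [pvLcp2, if_pos hxy, List.cons_prefix_cons]
        exact ⟨trivial, ih b⟩
      · simp [pvLcp2, hxy]

theorem pvLcp2_prefix_right (a b : List Char) : pvLcp2 a b <+: b := by
  induction a generalizing b with
  | nil => simp [pvLcp2]
  | cons x a ih =>
    cases b with
    | nil => simp [pvLcp2]
    | cons y b =>
      by_cases hxy : x = y
      · simp only [pvLcp2, if_pos hxy, List.cons_prefix_cons]
        exact ⟨hxy, ih b⟩
      · simp [pvLcp2, hxy]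

theorem pvLcp2_ne (a b : List Char) (h : (pvLcp2 a b).length < a.length) :
    b[(pvLcp2 a b).length]? ≠ a[(pvLcp2 a b).length]? := by
  induction a generalizing b with
  | nil => simp at h
  | cons x a ih =>
    cases b with
    | nil => simp [pvLcp2]
    | cons y b =>
      by_cases hxy : x = y
      · simp only [pvLcp2, if_pos hxy] at h ⊢
        simpa using ih b (by simpa using h)
      · simp [pvLcp2, hxy, Ne.symm hxy]

theorem pvPrefix_getElem? {l₁ l₂ : List Char} (h : l₁ <+: l₂) {i : Nat}
    (hi : i < l₁.length) : l₂[i]? = l₁[i]? := by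
  obtain ⟨t, rfl⟩ := h
  exact List.getElem?_append_left hi

theorem pvFoldLcp (rest : List (List Char)) (acc : List Char) :
    (rest.foldl pvLcp2 acc) <+: acc ∧
    (∀ d ∈ rest, (rest.foldl pvLcp2 acc) <+: d) ∧
    ((rest.foldl pvLcp2 acc).length < acc.length →
      ∃ d ∈ rest, d[(rest.foldl pvLcp2 acc).length]? ≠ acc[(rest.foldl pvLcp2 acc).length]?) := by
  induction rest generalizing acc with
  | nil => exact ⟨List.prefix_rfl, by simp, by simp⟩
  | cons b rest ih =>
    obtain ⟨h1, h2, h3⟩ := ih (pvLcp2 acc b)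
    have hab : pvLcp2 acc b <+: acc := pvLcp2_prefix_left acc b
    have hL : rest.foldl pvLcp2 (pvLcp2 acc b) <+: acc := h1.trans hab
    refine ⟨by simpa using hL, ?_, ?_⟩
    · intro d hd
      rcases List.mem_cons.mp hd with hd | hd
      · simpa [hd] using h1.trans (pvLcp2_prefix_right acc b)
      · simpa using h2 d hd
    · intro hlen
      simp only [List.foldl_cons] at hlen ⊢
      set L := rest.foldl pvLcp2 (pvLcp2 acc b) with hLdef
      by_cases hsh : L.length < (pvLcp2 acc b).length
      · obtain ⟨d, hd, hne⟩ := h3 hsh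
        refine ⟨d, List.mem_cons_of_mem b hd, ?_⟩
        rwa [pvPrefix_getElem? hab hsh]
      · -- L is a prefix of pvLcp2 acc b with equal length, hence equal
        have hEq : L = pvLcp2 acc b := h1.eq_of_length_le (Nat.le_of_not_lt hsh)
        refine ⟨b, List.mem_cons_self, ?_⟩
        rw [hEq]
        exact pvLcp2_ne acc b (by rwa [hEq] at hlen)

theorem pvRpart_append_dot (t : List Char) : pvRpartHead (t ++ ['.']) = t := by
  simp [pvRpartHead]

theorem pvRpart_append_ne (t : List Char) (x : Char) (hx : x ≠ '.') :
    pvRpartHead (t ++ [x]) = pvRpartHead t := by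
  simp [pvRpartHead, hx]

theorem pvMatchTrue (s : List Char) (rest : List (List Char)) (i : Nat)
    (hi : i < (rest.foldl pvLcp2 s).length) (hs : i < s.length) :
    ((s :: rest).all (fun d => PySem.List.pyGet? d (i : Int) == some s[i])) = true := by
  obtain ⟨h1, h2, _⟩ := pvFoldLcp rest s
  rw [List.all_eq_true]
  intro d hd
  have hpre : rest.foldl pvLcp2 s <+: d := by
    rcases List.mem_cons.mp hd with hd | hd
    · simpa [hd] using h1
    · exact h2 d hd
  rw [beq_iff_eq, PySem.List.pyGet?_natCast, pvPrefix_getElem? hpre hi,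
    ← pvPrefix_getElem? h1 hi, List.getElem?_eq_getElem hs]

theorem pvMatchFalse (s : List Char) (rest : List (List Char))
    (hm : (rest.foldl pvLcp2 s).length < s.length) :
    (((s :: rest).all (fun d =>
      PySem.List.pyGet? d ((rest.foldl pvLcp2 s).length : Int) == some s[(rest.foldl pvLcp2 s).length])) = false) := by
  obtain ⟨_, _, h3⟩ := pvFoldLcp rest s
  obtain ⟨d, hd, hne⟩ := h3 hm
  rw [List.all_eq_false]
  refine ⟨d, List.mem_cons_of_mem s hd, ?_⟩
  rw [beq_iff_eq, PySem.List.pyGet?_natCast]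
  intro hEq
  exact hne (by rw [hEq, List.getElem?_eq_getElem hm])

theorem pvLoopLem (s : List Char) (rest : List (List Char)) (k i : Nat) (c b : List Char)
    (hk : (rest.foldl pvLcp2 s).length - i = k) (hi : i ≤ (rest.foldl pvLcp2 s).length)
    (hend : i = s.length → s = [])
    (hcb : c ++ b = s.take i) (hc : c = pvRpartHead (s.take i)) :
    pvALoop (s :: rest) s i c b =
      (if (rest.foldl pvLcp2 s).length = s.length then s
       else pvRpartHead (s.take (rest.foldl pvLcp2 s).length)) := by
  induction k generalizing i c b with
  | zero =>
    have him : i = (rest.foldl pvLcp2 s).length := Nat.le_antisymm hi (by omega)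
    by_cases hms : (rest.foldl pvLcp2 s).length = s.length
    · have hs : s = [] := hend (by omega)
      subst hs
      have hc0 : c = [] := by
        have := hcb; simp at this; exact this.1
      rw [pvALoop]
      simp [hc0, pvRpartHead]
    · have hm : (rest.foldl pvLcp2 s).length < s.length :=
        Nat.lt_of_le_of_ne (List.IsPrefix.length_le (pvFoldLcp rest s).1) hms
      rw [pvALoop, dif_pos (him ▸ hm)]
      rw [if_neg (by
        have := pvMatchFalse s rest hm
        subst him
        simp only [this]
        exact fun hF => nomatch hF)]
      rw [hc, him, if_neg hms]
  | succ k ih =>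
    have hik : i < (rest.foldl pvLcp2 s).length := by omega
    have hmle : (rest.foldl pvLcp2 s).length ≤ s.length :=
      List.IsPrefix.length_le (pvFoldLcp rest s).1
    have his : i < s.length := Nat.lt_of_lt_of_le hik hmle
    have htk : s.take (i + 1) = s.take i ++ [s[i]] := by
      rw [List.take_add_one, List.getElem?_eq_getElem his]; rfl
    rw [pvALoop, dif_pos his, if_pos (pvMatchTrue s rest i hik his)]
    by_cases hfin : i + 1 = s.length
    · -- last character of s: the loop flushes and the next call exits the guard
      have hms : (rest.foldl pvLcp2 s).length = s.length := by omega
      have hcom : ∀ cb2 : List Char × List Char,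
          cb2.1 ++ cb2.2 = s.take i →
          (cb2.1 ++ (cb2.2 ++ [s[i]])) = s := by
        intro cb2 h2
        rw [← List.append_assoc, h2, ← htk, hfin, List.take_length]
      by_cases hdot : s[i] = '.'
      · simp only [if_pos hdot, if_pos (show i = s.length - 1 by omega)]
        rw [pvALoop, dif_neg (by omega)]
        rw [if_pos hms]
        exact hcom (c ++ b, []) (by simpa using hcb)
      · simp only [if_neg hdot, if_pos (show i = s.length - 1 by omega)]
        rw [pvALoop, dif_neg (by omega)]
        rw [if_pos hms]
        exact hcom (c, b) hcb
    · have hne1 : i ≠ s.length - 1 := by omega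
      by_cases hdot : s[i] = '.'
      · simp only [if_pos hdot, if_neg hne1]
        exact ih (i + 1) (c ++ b) [s[i]] (by omega) (by omega)
          (by omega)
          (by rw [hcb, htk])
          (by rw [hcb, htk, hdot, pvRpart_append_dot])
      · simp only [if_neg hdot, if_neg hne1]
        exact ih (i + 1) c (b ++ [s[i]]) (by omega) (by omega)
          (by omega)
          (by rw [← List.append_assoc, hcb, htk])
          (by rw [htk, pvRpart_append_ne _ _ hdot, hc])

theorem pvGroup_eq (derivs : List (List Char)) : pvAGroup derivs = pvBGroup derivs := by
  cases derivs with
  | nil => rfl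
  | cons s rest =>
    have hpre : rest.foldl pvLcp2 s <+: s := (pvFoldLcp rest s).1
    have hmle := List.IsPrefix.length_le hpre
    have htake : s.take (rest.foldl pvLcp2 s).length = rest.foldl pvLcp2 s :=
      (List.prefix_iff_eq_take.mp hpre).symm
    have h := pvLoopLem s rest (rest.foldl pvLcp2 s).length 0 [] [] (by omega) (by omega)
      (fun h0 => by simpa using (List.length_eq_zero_iff).mp (by omega))
      (by simp) (by simp [pvRpartHead])
    show pvALoop (s :: rest) s 0 [] [] = pvBGroup (s :: rest)
    rw [h]
    simp only [pvBGroup]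
    by_cases hms : (rest.foldl pvLcp2 s).length = s.length
    · rw [if_pos hms]
      rw [if_pos (hpre.eq_of_length_le (by omega))]
    · rw [if_neg hms, htake]
      rw [if_neg (fun hEq => hms (by rw [hEq]))]

-- ===== VERDICT (by name: the statement is the Claim_ definition above) =====
theorem clean_projection_spec : Claim_equal_clean_projection := by
  intro projection _
  unfold Spec_clean_projection clean_projection clean_projection_alt
  simp only [pvGroup_eq]
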